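-- pv_equiv track=rewrite | github.com/leandro-cine/z-score | ia_prescricao.py | _agrupar_vacinas_por_idade
-- ===== SOURCE A (Python) =====
-- from typing import Any, Dict, Optional, Tuple, List
--
-- def _as_list(valor: Any) -> List[str]:
--     if valor is None:
--         return []
--     if isinstance(valor, (list, tuple, set)):
--         bruto = list(valor)
--     else:
--         texto = str(valor)
--         for sep in ["\n", "|"]:
--             texto = texto.replace(sep, ";")
--         bruto = [p.strip() for p in texto.split(";")]
--     vistos = set()
--     saida: List[str] = []
--     for item in bruto:
--         s = str(item).strip().strip("-• ").strip()
--         if not s or s.lower() in {"—", "nenhuma", "nenhum", "nenhuma informada", "não informado", "nao informado"}: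
--             continue
--         k = s.lower()
--         if k not in vistos:
--             vistos.add(k)
--             saida.append(s)
--     return saida
--
-- def _agrupar_vacinas_por_idade(itens: Any) -> str:
--     lista = _as_list(itens)
--     if not lista:
--         return "nenhuma pendência informada"
--     grupos: Dict[str, List[str]] = {}
--     for item in lista:
--         idade = "idade não especificada"
--         nome_dose = item
--         if "(" in item and ")" in item:
--             idade = item.split("(")[-1].split(")")[0].strip()
--             nome_dose = item.rsplit("(", 1)[0].strip().strip("—").strip()
--         grupos.setdefault(idade, []).append(nome_dose)
--
--     ordem = ["Ao nascer", "2 meses", "3 meses", "4 meses", "5 meses", "6 meses", "9 meses", "12 meses", "15 meses", "4 anos", "5 anos", "9 a 14 anos", "Conforme produto", "Conforme PNI", "idade não especificada"]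
--     chaves = sorted(grupos.keys(), key=lambda x: ordem.index(x) if x in ordem else 999)
--     partes = []
--     for idade in chaves:
--         vacs = "; ".join(grupos[idade])
--         partes.append(f"{idade}: {vacs}")
--     return ". ".join(partes) + "."
-- ===== SOURCE B (Python) =====
-- # B: instead of sorting group keys by ordem.index, parse each item once into
-- # (idade, nome) pairs, dedup the labels first-seen, emit labels by scanning the
-- # fixed ordem list then the leftover labels in first-seen order. No dict of
-- # lists, no sorted.
-- from typing import Any, List, Tuple
--
-- def _as_list(valor: Any) -> List[str]:
--     if valor is None:
--         return []
--     if isinstance(valor, (list, tuple, set)):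
--         bruto = list(valor)
--     else:
--         texto = str(valor)
--         for sep in ["\n", "|"]:
--             texto = texto.replace(sep, ";")
--         bruto = [p.strip() for p in texto.split(";")]
--     vistos = set()
--     saida: List[str] = []
--     for item in bruto:
--         s = str(item).strip().strip("-• ").strip()
--         if not s or s.lower() in {"—", "nenhuma", "nenhum", "nenhuma informada", "não informado", "nao informado"}:
--             continue
--         k = s.lower()
--         if k not in vistos:
--             vistos.add(k)
--             saida.append(s)
--     return saida
--
-- _ORDEM = ["Ao nascer", "2 meses", "3 meses", "4 meses", "5 meses", "6 meses", "9 meses", "12 meses", "15 meses", "4 anos", "5 anos", "9 a 14 anos", "Conforme produto", "Conforme PNI", "idade não especificada"]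
--
-- def _parse(item: str) -> Tuple[str, str]:
--     if "(" in item and ")" in item:
--         idade = item.split("(")[-1].split(")")[0].strip()
--         nome = item.rsplit("(", 1)[0].strip().strip("—").strip()
--         return idade, nome
--     return "idade não especificada", item
--
-- def _agrupar_vacinas_por_idade(itens: Any) -> str:
--     lista = _as_list(itens)
--     if not lista:
--         return "nenhuma pendência informada"
--     pares = [_parse(item) for item in lista]
--     labels = list(dict.fromkeys(i for i, _ in pares))
--     ordered = [l for l in _ORDEM if l in labels] + [l for l in labels if l not in _ORDEM]
--     partes = ["{}: {}".format(l, "; ".join(n for i, n in pares if i == l)) for l in ordered]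
--     return ". ".join(partes) + "."
-- ===== Notes on version B (the rewrite author's own statement) =====
-- stated objective: alternative
-- what changed: B drops the dict-of-lists and the sort of its keys by ordem.index: it parses each item once into (label, dose) pairs, dedups labels first-seen, then emits by scanning the fixed ordem list in order followed by the leftover labels in first-seen order, gathering each label's doses by filtering the pairs.
import Mathlib
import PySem

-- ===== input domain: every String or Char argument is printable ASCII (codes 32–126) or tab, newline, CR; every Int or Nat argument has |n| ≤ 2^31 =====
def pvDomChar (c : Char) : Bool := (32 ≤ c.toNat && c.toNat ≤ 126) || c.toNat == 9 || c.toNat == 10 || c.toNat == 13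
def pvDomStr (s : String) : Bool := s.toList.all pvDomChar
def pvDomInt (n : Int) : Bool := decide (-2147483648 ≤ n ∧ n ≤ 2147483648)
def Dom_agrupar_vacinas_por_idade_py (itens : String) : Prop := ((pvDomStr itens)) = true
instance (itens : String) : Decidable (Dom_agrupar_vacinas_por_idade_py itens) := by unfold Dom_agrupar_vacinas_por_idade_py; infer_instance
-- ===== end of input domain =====

-- B replaces sorting the group keys by ordem.index with one parse pass into (label, dose)
-- pairs, a first-seen dedup of the labels, and emission by scanning the fixed ordem list
-- then the leftover labels in first-seen order (objective: alternative decomposition).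

-- ===== PORT A =====
-- s.split(sep) for sep ≠ "" (split? is none only for sep = "")
def pvSplit (s sep : String) : List String := (PySem.Str.split? s sep).getD []

def pvSentinels : List String := ["—", "nenhuma", "nenhum", "nenhuma informada", "não informado", "nao informado"]

-- _as_list for a str argument (the Lean signature fixes itens : String, so only the
-- str branch of the Python isinstance dispatch is reachable)
def pvAsList (valor : String) : List String :=
  let texto := PySem.Str.replace (PySem.Str.replace valor "\n" ";") "|" ";"
  let bruto := (pvSplit texto ";").map PySem.Str.strip
  (bruto.foldl (fun (acc : PySem.Set String × List String) item =>
      let s := PySem.Str.strip (PySem.Str.stripChars (PySem.Str.strip item) "-• ")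
      if s = "" ∨ PySem.Str.lower s ∈ pvSentinels then acc
      else
        let k := PySem.Str.lower s
        if k ∈ acc.1 then acc else (acc.1.add k, acc.2 ++ [s]))
    (PySem.Set.ofList [], [])).2

def pvOrdem : List String := ["Ao nascer", "2 meses", "3 meses", "4 meses", "5 meses", "6 meses", "9 meses", "12 meses", "15 meses", "4 anos", "5 anos", "9 a 14 anos", "Conforme produto", "Conforme PNI", "idade não especificada"]

-- Python: ordem.index(x) if x in ordem else 999
def pvKey (x : String) : Int :=
  match PySem.List.index? pvOrdem x with
  | some i => (i : Int)
  | none => 999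

def agrupar_vacinas_por_idade_py (itens : String) : String :=
  let lista := pvAsList itens
  if lista = [] then "nenhuma pendência informada"
  else
    -- grupos.setdefault(idade, []).append(nome_dose)  =  modify idade [] (· ++ [nome_dose])
    let grupos := lista.foldl (fun (d : PySem.Dict String (List String)) item =>
      let idade := "idade não especificada"
      let nome_dose := item
      let pr : String × String :=
        if PySem.Str.isIn "(" item && PySem.Str.isIn ")" item then
          -- item.split("(")[-1].split(")")[0].strip()   (split never returns []: getD "" unreachable)
          -- item.rsplit("(", 1)[0] = "(".join(item.split("(")[:-1])  since "(" ∈ item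
          (PySem.Str.strip (((pvSplit ((pvSplit item "(").getLast?.getD "") ")").head?).getD ""),
           PySem.Str.strip (PySem.Str.stripChars (PySem.Str.strip (PySem.Str.join "(" (pvSplit item "(").dropLast)) "—"))
        else (idade, nome_dose)
      d.modify pr.1 [] (· ++ [pr.2])) PySem.Dict.empty
    let chaves := PySem.List.sorted grupos.keys pvKey false
    -- grupos[idade]: idade ∈ grupos.keys, so KeyError is unreachable; getD is exact here
    let partes := chaves.map (fun idade => idade ++ ": " ++ PySem.Str.join "; " (grupos.getD idade []))
    PySem.Str.join ". " partes ++ "."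

-- ===== PORT B =====
def pvParse (item : String) : String × String :=
  if PySem.Str.isIn "(" item && PySem.Str.isIn ")" item then
    (PySem.Str.strip (((pvSplit ((pvSplit item "(").getLast?.getD "") ")").head?).getD ""),
     PySem.Str.strip (PySem.Str.stripChars (PySem.Str.strip (PySem.Str.join "(" (pvSplit item "(").dropLast)) "—"))
  else ("idade não especificada", item)

def agrupar_vacinas_por_idade_py_alt (itens : String) : String :=
  let lista := pvAsList itens
  if lista = [] then "nenhuma pendência informada"
  else
    let pares := lista.map pvParse
    let labels := PySem.List.dedup (pares.map (·.1))
    let ordered := pvOrdem.filter (fun l => decide (l ∈ labels)) ++ labels.filter (fun l => decide (l ∉ pvOrdem))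
    let partes := ordered.map (fun l =>
      l ++ ": " ++ PySem.Str.join "; " ((pares.filter (fun p => p.1 == l)).map (·.2)))
    PySem.Str.join ". " partes ++ "."

-- ===== PRECONDITION & SPEC =====
def Spec_agrupar_vacinas_por_idade_py (itens : String) (out : String) : Prop := out = agrupar_vacinas_por_idade_py_alt itens
instance (itens : String) (out : String) : Decidable (Spec_agrupar_vacinas_por_idade_py itens out) := by unfold Spec_agrupar_vacinas_por_idade_py; infer_instance

-- ===== CLAIM (what is proved, stated in full; the proofs are below) =====
def Claim_equal_agrupar_vacinas_por_idade_py : Prop := ∀ (itens : String), Dom_agrupar_vacinas_por_idade_py itens → Spec_agrupar_vacinas_por_idade_py itens (agrupar_vacinas_por_idade_py itens)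

-- ===== LEMMAS AND PROOFS =====

theorem pvKey_le (a : String) : pvKey a ≤ 999 := by
  unfold pvKey
  cases h : PySem.List.index? pvOrdem a with
  | none => simp
  | some k =>
    obtain ⟨hk, -, -⟩ := PySem.List.getElem_of_index?_eq_some h
    simp only [pvOrdem, List.length] at hk
    show (k : Int) ≤ 999
    omega

theorem pvKey_of_not_mem {a : String} (h : a ∉ pvOrdem) : pvKey a = 999 := by
  unfold pvKey
  rw [(PySem.List.index?_eq_none_iff pvOrdem a).mpr h]

-- insertion position of a stable insertion-sort step, by key comparisons
theorem insertBy_split (key : String → Int) (x : String) (l1 l2 : List String)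
    (h1 : ∀ a ∈ l1, ¬ key x < key a) (h2 : ∀ a ∈ l2, key x < key a) :
    PySem.List.insertBy (fun a b => decide (key a < key b)) x (l1 ++ l2) = l1 ++ x :: l2 := by
  induction l1 with
  | nil =>
    cases l2 with
    | nil => rfl
    | cons z zs =>
      simp only [List.nil_append, PySem.List.insertBy]
      rw [if_pos]
      exact decide_eq_true (h2 z (by simp))
  | cons y ys ih =>
    simp only [List.cons_append, PySem.List.insertBy]
    rw [if_neg, ih (fun a ha => h1 a (by simp [ha]))]
    simp only [decide_eq_true_eq]
    exact h1 y (by simp)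

-- one sort step for an element outside ordem: appended at the end
theorem step_not_mem (key : String → Int) (x : String) (acc : List String)
    (hx : key x = 999) (hle : ∀ a, key a ≤ 999) :
    PySem.List.insertBy (fun a b => decide (key a < key b)) x acc = acc ++ [x] := by
  apply PySem.List.insertBy_of_forall_not_before
  intro y _
  simp only [decide_eq_false_iff_not, not_lt, hx]
  exact hle y

-- one sort step for an element of ordem, placed between the smaller- and larger-keyed parts
theorem step_mem (p : List String) (x : String) (o1 o2 : List String)
    (horder : pvOrdem = o1 ++ x :: o2)
    (h1 : ∀ a ∈ o1, pvKey a < pvKey x) (h2 : ∀ a ∈ o2, pvKey x < pvKey a)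
    (hx999 : pvKey x < 999) (hxp : x ∉ p) (hxo1 : x ∉ o1) (hxo2 : x ∉ o2) :
    PySem.List.insertBy (fun a b => decide (pvKey a < pvKey b)) x
      (pvOrdem.filter (fun l => decide (l ∈ p)) ++ p.filter (fun l => decide (l ∉ pvOrdem)))
      = pvOrdem.filter (fun l => decide (l ∈ p ++ [x])) ++ (p ++ [x]).filter (fun l => decide (l ∉ pvOrdem)) := by
  have hxo : x ∈ pvOrdem := by rw [horder]; simp
  have hfo1 : ∀ (q : List String), o1.filter (fun l => decide (l ∈ q ++ [x])) = o1.filter (fun l => decide (l ∈ q)) := by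
    intro q
    apply List.filter_congr
    intro a ha
    have : a ≠ x := fun h => hxo1 (h ▸ ha)
    simp [List.mem_append, this]
  have hfo2 : ∀ (q : List String), o2.filter (fun l => decide (l ∈ q ++ [x])) = o2.filter (fun l => decide (l ∈ q)) := by
    intro q
    apply List.filter_congr
    intro a ha
    have : a ≠ x := fun h => hxo2 (h ▸ ha)
    simp [List.mem_append, this]
  have hS : (p ++ [x]).filter (fun l => decide (l ∉ pvOrdem)) = p.filter (fun l => decide (l ∉ pvOrdem)) := by
    rw [List.filter_append]
    simp [hxo]
  rw [hS, horder]
  simp only [List.filter_append, List.filter_cons]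
  have hxq : (decide (x ∈ p ++ [x])) = true := by simp
  have hxnp : (decide (x ∈ p)) = false := by simp [hxp]
  rw [hxq, hxnp, hfo1, hfo2]
  simp only [Bool.false_eq_true, if_false, if_true]
  rw [List.append_assoc, List.append_assoc]
  rw [insertBy_split pvKey x (o1.filter (fun l => decide (l ∈ p)))
        (o2.filter (fun l => decide (l ∈ p)) ++ p.filter (fun l => decide (l ∉ o1 ++ x :: o2)))]
  · simp
  · intro a ha
    exact not_lt.mpr (le_of_lt (h1 a (List.mem_of_mem_filter ha)))
  · intro a ha
    rcases List.mem_append.mp ha with ha' | ha'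
    · exact h2 a (List.mem_of_mem_filter ha')
    · have : a ∉ pvOrdem := by
        rw [horder]
        have := List.of_mem_filter ha'
        simpa using this
      rw [pvKey_of_not_mem this]
      exact hx999

-- the stable sort by ordem-rank: ordem members first in ordem order, the rest in input order
theorem sorted_key_eq (ks : List String) : ks.Nodup →
    PySem.List.sorted ks pvKey false
      = pvOrdem.filter (fun l => decide (l ∈ ks)) ++ ks.filter (fun l => decide (l ∉ pvOrdem)) := by
  rw [PySem.List.sorted_eq_foldl_insertBy]
  induction ks using List.reverseRecOn with
  | nil => intro _; simp
  | append_singleton p x ih =>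
    intro hnd
    rw [List.nodup_append] at hnd
    obtain ⟨hp, -, hdisj⟩ := hnd
    have hxp : x ∉ p := fun hm => by simpa using hdisj x hm
    rw [List.foldl_append]
    simp only [List.foldl_cons, List.foldl_nil]
    rw [ih hp]
    by_cases hxo : x ∈ pvOrdem
    · have hcases := hxo
      simp only [pvOrdem, List.mem_cons, List.not_mem_nil, or_false] at hcases
      rcases hcases with rfl|rfl|rfl|rfl|rfl|rfl|rfl|rfl|rfl|rfl|rfl|rfl|rfl|rfl|rfl
      · exact step_mem p _ [] ["2 meses", "3 meses", "4 meses", "5 meses", "6 meses", "9 meses", "12 meses", "15 meses", "4 anos", "5 anos", "9 a 14 anos", "Conforme produto", "Conforme PNI", "idade não especificada"] (by rfl) (by decide) (by decide) (by decide) hxp (by decide) (by decide)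
      · exact step_mem p _ ["Ao nascer"] ["3 meses", "4 meses", "5 meses", "6 meses", "9 meses", "12 meses", "15 meses", "4 anos", "5 anos", "9 a 14 anos", "Conforme produto", "Conforme PNI", "idade não especificada"] (by rfl) (by decide) (by decide) (by decide) hxp (by decide) (by decide)
      · exact step_mem p _ ["Ao nascer", "2 meses"] ["4 meses", "5 meses", "6 meses", "9 meses", "12 meses", "15 meses", "4 anos", "5 anos", "9 a 14 anos", "Conforme produto", "Conforme PNI", "idade não especificada"] (by rfl) (by decide) (by decide) (by decide) hxp (by decide) (by decide)
      · exact step_mem p _ ["Ao nascer", "2 meses", "3 meses"] ["5 meses", "6 meses", "9 meses", "12 meses", "15 meses", "4 anos", "5 anos", "9 a 14 anos", "Conforme produto", "Conforme PNI", "idade não especificada"] (by rfl) (by decide) (by decide) (by decide) hxp (by decide) (by decide)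
      · exact step_mem p _ ["Ao nascer", "2 meses", "3 meses", "4 meses"] ["6 meses", "9 meses", "12 meses", "15 meses", "4 anos", "5 anos", "9 a 14 anos", "Conforme produto", "Conforme PNI", "idade não especificada"] (by rfl) (by decide) (by decide) (by decide) hxp (by decide) (by decide)
      · exact step_mem p _ ["Ao nascer", "2 meses", "3 meses", "4 meses", "5 meses"] ["9 meses", "12 meses", "15 meses", "4 anos", "5 anos", "9 a 14 anos", "Conforme produto", "Conforme PNI", "idade não especificada"] (by rfl) (by decide) (by decide) (by decide) hxp (by decide) (by decide)
      · exact step_mem p _ ["Ao nascer", "2 meses", "3 meses", "4 meses", "5 meses", "6 meses"] ["12 meses", "15 meses", "4 anos", "5 anos", "9 a 14 anos", "Conforme produto", "Conforme PNI", "idade não especificada"] (by rfl) (by decide) (by decide) (by decide) hxp (by decide) (by decide)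
      · exact step_mem p _ ["Ao nascer", "2 meses", "3 meses", "4 meses", "5 meses", "6 meses", "9 meses"] ["15 meses", "4 anos", "5 anos", "9 a 14 anos", "Conforme produto", "Conforme PNI", "idade não especificada"] (by rfl) (by decide) (by decide) (by decide) hxp (by decide) (by decide)
      · exact step_mem p _ ["Ao nascer", "2 meses", "3 meses", "4 meses", "5 meses", "6 meses", "9 meses", "12 meses"] ["4 anos", "5 anos", "9 a 14 anos", "Conforme produto", "Conforme PNI", "idade não especificada"] (by rfl) (by decide) (by decide) (by decide) hxp (by decide) (by decide)
      · exact step_mem p _ ["Ao nascer", "2 meses", "3 meses", "4 meses", "5 meses", "6 meses", "9 meses", "12 meses", "15 meses"] ["5 anos", "9 a 14 anos", "Conforme produto", "Conforme PNI", "idade não especificada"] (by rfl) (by decide) (by decide) (by decide) hxp (by decide) (by decide)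
      · exact step_mem p _ ["Ao nascer", "2 meses", "3 meses", "4 meses", "5 meses", "6 meses", "9 meses", "12 meses", "15 meses", "4 anos"] ["9 a 14 anos", "Conforme produto", "Conforme PNI", "idade não especificada"] (by rfl) (by decide) (by decide) (by decide) hxp (by decide) (by decide)
      · exact step_mem p _ ["Ao nascer", "2 meses", "3 meses", "4 meses", "5 meses", "6 meses", "9 meses", "12 meses", "15 meses", "4 anos", "5 anos"] ["Conforme produto", "Conforme PNI", "idade não especificada"] (by rfl) (by decide) (by decide) (by decide) hxp (by decide) (by decide)
      · exact step_mem p _ ["Ao nascer", "2 meses", "3 meses", "4 meses", "5 meses", "6 meses", "9 meses", "12 meses", "15 meses", "4 anos", "5 anos", "9 a 14 anos"] ["Conforme PNI", "idade não especificada"] (by rfl) (by decide) (by decide) (by decide) hxp (by decide) (by decide)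
      · exact step_mem p _ ["Ao nascer", "2 meses", "3 meses", "4 meses", "5 meses", "6 meses", "9 meses", "12 meses", "15 meses", "4 anos", "5 anos", "9 a 14 anos", "Conforme produto"] ["idade não especificada"] (by rfl) (by decide) (by decide) (by decide) hxp (by decide) (by decide)
      · exact step_mem p _ ["Ao nascer", "2 meses", "3 meses", "4 meses", "5 meses", "6 meses", "9 meses", "12 meses", "15 meses", "4 anos", "5 anos", "9 a 14 anos", "Conforme produto", "Conforme PNI"] [] (by rfl) (by decide) (by decide) (by decide) hxp (by decide) (by decide)
    · rw [step_not_mem pvKey x _ (pvKey_of_not_mem hxo) pvKey_le]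
      have hF : pvOrdem.filter (fun l => decide (l ∈ p ++ [x])) = pvOrdem.filter (fun l => decide (l ∈ p)) := by
        apply List.filter_congr
        intro a ha
        have : a ≠ x := fun h => hxo (h ▸ ha)
        simp [List.mem_append, this]
      have hS : (p ++ [x]).filter (fun l => decide (l ∉ pvOrdem)) = p.filter (fun l => decide (l ∉ pvOrdem)) ++ [x] := by
        rw [List.filter_append]
        simp [hxo]
      rw [hF, hS, List.append_assoc]


-- proof-side abbreviations for A's dict fold, rephrased over the parsed pairs
def pvG (lista : List String) : PySem.Dict String (List String) :=
  (lista.map pvParse).foldl (fun d p => d.modify p.1 [] (fun v => v ++ [p.2])) PySem.Dict.empty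

def pvLbl (lista : List String) : List String := PySem.List.dedup ((lista.map pvParse).map (·.1))

theorem fold_eq (lista : List String) :
    lista.foldl (fun (d : PySem.Dict String (List String)) item =>
      let idade := "idade não especificada"
      let nome_dose := item
      let pr : String × String :=
        if PySem.Str.isIn "(" item && PySem.Str.isIn ")" item then
          (PySem.Str.strip (((pvSplit ((pvSplit item "(").getLast?.getD "") ")").head?).getD ""),
           PySem.Str.strip (PySem.Str.stripChars (PySem.Str.strip (PySem.Str.join "(" (pvSplit item "(").dropLast)) "—"))
        else (idade, nome_dose)
      d.modify pr.1 [] (· ++ [pr.2])) PySem.Dict.empty = pvG lista := by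
  unfold pvG
  rw [List.foldl_map]
  rfl

theorem keys_G (lista : List String) : (pvG lista).keys = pvLbl lista := by
  unfold pvG pvLbl
  rw [PySem.Dict.keys_foldl_modify_key]
  simp [pysem]
  rw [← List.foldl_map]
  rfl

theorem getD_G (lista : List String) (l : String) :
    (pvG lista).getD l [] = ((lista.map pvParse).filter (fun p => p.1 == l)).map (·.2) := by
  unfold pvG
  rw [PySem.Dict.getD_foldl_modify_append]
  simp [pysem]

theorem chaves_eq (lista : List String) :
    PySem.List.sorted (pvG lista).keys pvKey false
      = pvOrdem.filter (fun l => decide (l ∈ pvLbl lista)) ++ (pvLbl lista).filter (fun l => decide (l ∉ pvOrdem)) := by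
  rw [keys_G]
  exact sorted_key_eq _ (PySem.List.nodup_dedup _)

-- the non-empty branch: A's sorted-keys rendering equals B's ordem-scan rendering
theorem branch_eq (lista : List String) :
    PySem.Str.join ". " ((PySem.List.sorted (pvG lista).keys pvKey false).map
        (fun idade => idade ++ ": " ++ PySem.Str.join "; " ((pvG lista).getD idade []))) ++ "."
  = PySem.Str.join ". " ((pvOrdem.filter (fun l => decide (l ∈ pvLbl lista)) ++ (pvLbl lista).filter (fun l => decide (l ∉ pvOrdem))).map
        (fun l => l ++ ": " ++ PySem.Str.join "; " (((lista.map pvParse).filter (fun p => p.1 == l)).map (·.2)))) ++ "." := by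
  rw [chaves_eq]
  congr 1
  apply congrArg
  apply List.map_congr_left
  intro l _
  rw [getD_G]

-- ===== VERDICT (by name: the statement is the Claim_ definition above) =====
theorem agrupar_vacinas_por_idade_py_spec : Claim_equal_agrupar_vacinas_por_idade_py := by
  intro itens _
  unfold Spec_agrupar_vacinas_por_idade_py
  unfold agrupar_vacinas_por_idade_py agrupar_vacinas_por_idade_py_alt
  simp only []
  by_cases h : pvAsList itens = []
  · rw [if_pos h, if_pos h]
  · rw [if_neg h, if_neg h, fold_eq (pvAsList itens)]
    exact branch_eq (pvAsList itens)
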